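-- pv_equiv track=rewrite | github.com/D21IT169/Internship | Sets/heterogram.py | hetero
-- ===== SOURCE A (Python) =====
-- def hetero(stri):
--     stri = stri.lower()
--
--     B = set()
--
--     for i in stri:
--         if i in B:
--             return False
--         else:
--             B.add(i)
--     return True
-- ===== SOURCE B (Python) =====
-- def hetero(stri):
--     s = sorted(stri.lower())
--     for a, b in zip(s, s[1:]):
--         if a == b:
--             return False
--     return True
-- ===== Notes on version B (the rewrite author's own statement) =====
-- stated objective: alternative
-- what changed: A scans incrementally with a growing set, a membership branch and an early return; B sorts the lowered characters and checks that no two adjacent characters of the sorted list are equal, so duplicates are detected by adjacency after sorting rather than by set membership.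
import Mathlib
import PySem

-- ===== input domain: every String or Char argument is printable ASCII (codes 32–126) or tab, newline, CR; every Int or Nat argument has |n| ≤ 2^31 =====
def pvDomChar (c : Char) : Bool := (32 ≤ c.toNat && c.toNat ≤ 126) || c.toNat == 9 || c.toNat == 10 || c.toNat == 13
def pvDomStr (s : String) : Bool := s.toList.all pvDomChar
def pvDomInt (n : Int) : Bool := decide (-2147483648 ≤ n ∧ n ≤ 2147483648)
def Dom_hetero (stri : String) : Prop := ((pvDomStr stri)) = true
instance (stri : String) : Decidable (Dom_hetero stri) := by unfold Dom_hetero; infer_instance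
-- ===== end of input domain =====

-- B replaces A's set-membership scan with early exit by sort-then-adjacent-comparison (objective: alternative).

-- ===== PORT A =====
-- the for-loop over the lowered string with the early 'return False'
def heteroLoop : List Char → PySem.Set Char → Bool
  | [], _ => true
  | c :: cs, B => if PySem.Set.contains B c then false else heteroLoop cs (PySem.Set.add B c)

def hetero (stri : String) : Bool :=
  heteroLoop (PySem.Str.lower stri).toList PySem.Set.empty

-- ===== PORT B =====
-- the for-loop over zip(s, s[1:]) with the early 'return False'
def heteroZipLoop : List (Char × Char) → Bool
  | [] => true
  | (a, b) :: rest => if a == b then false else heteroZipLoop rest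

def hetero_alt (stri : String) : Bool :=
  let s := PySem.List.sorted (PySem.Str.lower stri).toList (fun c => c) false
  heteroZipLoop (s.zip (PySem.List.slice s (some 1) none))

-- ===== PRECONDITION & SPEC =====
def Spec_hetero (stri : String) (out : Bool) : Prop := out = hetero_alt stri
instance (stri : String) (out : Bool) : Decidable (Spec_hetero stri out) := by unfold Spec_hetero; infer_instance

-- ===== CLAIM =====
def Claim_equal_hetero : Prop := ∀ (stri : String), Dom_hetero stri → Spec_hetero stri (hetero stri)

-- ===== LEMMAS AND PROOFS =====

-- A's loop decides: the remaining chars are distinct and none is already in B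
theorem heteroLoop_eq (cs : List Char) : ∀ (B : PySem.Set Char),
    heteroLoop cs B = decide (cs.Nodup ∧ ∀ c ∈ cs, c ∉ B) := by
  induction cs with
  | nil => intro B; simp [heteroLoop]
  | cons c cs ih =>
    intro B
    simp only [heteroLoop, ih]
    by_cases h : c ∈ B
    · simp [h]
    · rw [if_neg (fun hc => h ((PySem.Set.contains_iff B c).1 hc)), decide_eq_decide]
      constructor
      · rintro ⟨hn, hall⟩
        refine ⟨List.nodup_cons.2 ⟨fun hc => (hall c hc) ((PySem.Set.mem_add B c c).2 (Or.inr rfl)), hn⟩, ?_⟩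
        intro a ha
        rcases List.mem_cons.1 ha with rfl | ha'
        · exact h
        · exact fun hB => (hall a ha') ((PySem.Set.mem_add B c a).2 (Or.inl hB))
      · rintro ⟨hn, hall⟩
        rcases List.nodup_cons.1 hn with ⟨hcn, hn'⟩
        refine ⟨hn', fun a ha hB => ?_⟩
        rcases (PySem.Set.mem_add B c a).1 hB with hB' | rfl
        · exact hall a (List.mem_cons_of_mem _ ha) hB'
        · exact hcn ha

-- B's loop over zip(s, s.tail) decides that no two adjacent elements are equal
theorem heteroZipLoop_eq (s : List Char) :
    heteroZipLoop (s.zip s.tail) = true ↔ List.IsChain (· ≠ ·) s := by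
  induction s with
  | nil => simp [heteroZipLoop]
  | cons a s ih =>
    cases s with
    | nil => simp [heteroZipLoop]
    | cons b t =>
      simp only [List.tail_cons, List.zip_cons_cons, heteroZipLoop]
      by_cases hab : a = b
      · simp [hab, List.isChain_cons_cons]
      · rw [if_neg (by simpa using hab)]
        rw [show (b :: t).zip t = (b :: t).zip (b :: t).tail by simp, ih]
        simp [List.isChain_cons_cons, hab]

-- a ≤-sorted list with distinct adjacent elements is strictly increasing
theorem chain_lt_of_pairwise_le (s : List Char)
    (hle : s.Pairwise (· ≤ ·)) (hne : List.IsChain (· ≠ ·) s) :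
    List.IsChain (· < ·) s := by
  induction s with
  | nil => exact List.isChain_nil
  | cons a s ih =>
    cases s with
    | nil => simp
    | cons b t =>
      rcases List.pairwise_cons.1 hle with ⟨hafirst, hle'⟩
      rcases List.isChain_cons_cons.1 hne with ⟨hab, hne'⟩
      exact List.isChain_cons_cons.2
        ⟨lt_of_le_of_ne (hafirst b (by simp)) hab, ih hle' hne'⟩

-- for a ≤-sorted list, Nodup ↔ adjacent elements distinct
theorem nodup_iff_chain_ne (s : List Char) (hle : s.Pairwise (· ≤ ·)) :
    s.Nodup ↔ List.IsChain (· ≠ ·) s := by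
  constructor
  · intro hn; exact List.Pairwise.isChain hn
  · intro hc
    have hlt : s.Pairwise (· < ·) :=
      List.isChain_iff_pairwise.1 (chain_lt_of_pairwise_le s hle hc)
    exact hlt.imp ne_of_lt

-- ===== VERDICT =====
theorem hetero_spec : Claim_equal_hetero := by
  intro stri _
  unfold Spec_hetero hetero hetero_alt
  simp only [PySem.List.slice_from_one]
  rw [heteroLoop_eq]
  rw [Bool.eq_iff_iff, decide_eq_true_iff, heteroZipLoop_eq]
  have hperm : (PySem.List.sorted (PySem.Str.lower stri).toList (fun c => c) false).Perm
      (PySem.Str.lower stri).toList := PySem.List.sorted_perm _ _ _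
  have hle : (PySem.List.sorted (PySem.Str.lower stri).toList (fun c => c) false).Pairwise (· ≤ ·) := by
    have := PySem.List.sorted_pairwise (xs := (PySem.Str.lower stri).toList) (key := fun c => c)
    simpa using this
  rw [show PySem.Set.empty = ([] : List Char) from rfl]
  simp only [List.not_mem_nil, not_false_iff, implies_true, and_true]
  rw [← hperm.nodup_iff]
  exact nodup_iff_chain_ne _ hle
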